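-- pv_equiv track=rewrite | github.com/iampujan/problemsolving | language of pirates/languageofpirates.py | first_digit_to_end
-- ===== SOURCE A (Python) =====
-- def first_digit_to_end(my_input):
--     splitted = my_input.split(" ")
--     added = [item[1:] + item[:1] + "arg" for item in splitted]
--
--     final = ""
--     for item in added:
--         special = ""
--         alphanum = ""
--         for char in item:
--             if char.isalnum():
--                 alphanum = alphanum+char
--             else:
--                 special = special + char
--         final = final + alphanum + special + " "
--     return final
-- ===== SOURCE B (Python) =====
-- def first_digit_to_end(my_input):
--     words = [w[1:] + w[:1] + "arg" for w in my_input.split(" ")]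
--     result = ["".join(sorted(w, key=lambda c: not c.isalnum())) for w in words]
--     return " ".join(result) + " "
-- ===== Notes on version B (the rewrite author's own statement) =====
-- stated objective: idiomatic
-- what changed: The hand-rolled two-accumulator scan that buckets each rearranged word's characters into alnum/special strings, and the string-concatenation accumulator loop, are replaced by one stable sort per word (key: not c.isalnum()) inside a list comprehension and a single space-join plus a trailing space.
import Mathlib
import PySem

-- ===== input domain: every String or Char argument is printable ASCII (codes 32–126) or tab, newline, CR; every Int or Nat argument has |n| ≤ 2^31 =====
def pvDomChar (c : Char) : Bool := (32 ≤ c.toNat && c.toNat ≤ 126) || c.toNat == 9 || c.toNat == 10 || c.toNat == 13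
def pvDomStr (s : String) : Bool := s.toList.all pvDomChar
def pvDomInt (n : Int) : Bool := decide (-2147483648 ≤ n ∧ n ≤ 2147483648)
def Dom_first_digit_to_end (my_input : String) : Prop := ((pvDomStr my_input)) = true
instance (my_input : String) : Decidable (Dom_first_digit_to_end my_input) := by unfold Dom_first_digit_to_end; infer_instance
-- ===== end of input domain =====

-- B replaces A's two-accumulator alnum/special bucket loop and string-concatenation
-- accumulator with a stable sort per word and a single space-join (idiomatic, not claimed faster).


-- ===== PORT A =====
def first_digit_to_end (my_input : String) : String :=
  let splitted := PySem.Chars.splitOn my_input.toList " ".toList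
  let added := splitted.map (fun item =>
    PySem.List.slice item (some 1) none ++ PySem.List.slice item none (some 1) ++ "arg".toList)
  let final := added.foldl (fun final item =>
    let sa := item.foldl (fun (sa : List Char × List Char) char =>
      if PySem.Chars.isalnum char then (sa.1, sa.2 ++ [char]) else (sa.1 ++ [char], sa.2))
      ([], [])
    final ++ sa.2 ++ sa.1 ++ [' ']) []
  String.ofList final

-- ===== PORT B =====
-- key 'not c.isalnum()': Python's False < True ported as Int 0 < 1
def first_digit_to_end_alt (my_input : String) : String :=
  let words := (PySem.Chars.splitOn my_input.toList " ".toList).map (fun w =>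
    PySem.List.slice w (some 1) none ++ PySem.List.slice w none (some 1) ++ "arg".toList)
  let result := words.map (fun w =>
    PySem.List.sorted w (fun c => if PySem.Chars.isalnum c then (0 : Int) else 1) false)
  String.ofList (PySem.Chars.join " ".toList result ++ [' '])

-- ===== PRECONDITION & SPEC =====
def Spec_first_digit_to_end (my_input : String) (out : String) : Prop := out = first_digit_to_end_alt my_input
instance (my_input : String) (out : String) : Decidable (Spec_first_digit_to_end my_input out) := by unfold Spec_first_digit_to_end; infer_instance

-- ===== CLAIM (what is proved, stated in full; the proofs are below) =====
def Claim_equal_first_digit_to_end : Prop := ∀ (my_input : String), Dom_first_digit_to_end my_input → Spec_first_digit_to_end my_input (first_digit_to_end my_input)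

-- ===== LEMMAS AND PROOFS =====

-- splitOn.go always delivers at least one piece
lemma pvGo_ne_nil (sep : List Char) : ∀ (fuel : Nat) (s cur : List Char) (acc : List (List Char)),
    PySem.Chars.splitOn.go sep fuel s cur acc ≠ [] := by
  intro fuel
  induction fuel with
  | zero => intro s cur acc; simp [PySem.Chars.splitOn.go]
  | succ n ih =>
    intro s cur acc
    cases s with
    | nil => simp [PySem.Chars.splitOn.go]
    | cons c rest =>
      rw [PySem.Chars.splitOn.go]
      split
      · exact ih _ _ _
      · exact ih _ _ _

lemma pvSplitOn_ne_nil (s sep : List Char) : PySem.Chars.splitOn s sep ≠ [] :=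
  pvGo_ne_nil sep _ s [] []

-- A's inner bucket loop is the pair of filters (special, alphanum)
lemma pvBucket (cs : List Char) : ∀ (a b : List Char),
    cs.foldl (fun (sa : List Char × List Char) char =>
      if PySem.Chars.isalnum char then (sa.1, sa.2 ++ [char]) else (sa.1 ++ [char], sa.2)) (a, b)
    = (a ++ cs.filter (fun c => !PySem.Chars.isalnum c), b ++ cs.filter (fun c => PySem.Chars.isalnum c)) := by
  induction cs with
  | nil => intro a b; simp
  | cons c cs ih =>
    intro a b
    by_cases h : PySem.Chars.isalnum c
    · simp [h, ih]
    · simp [h, ih]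

-- inserting an element whose key is not below any key in the prefix walks past it
lemma pvInsertBy_append (before : Char → Char → Bool) (x : Char) :
    ∀ (A B : List Char), (∀ a ∈ A, before x a = false) →
    PySem.List.insertBy before x (A ++ B) = A ++ PySem.List.insertBy before x B := by
  intro A
  induction A with
  | nil => intro B _; simp
  | cons a A ih =>
    intro B h
    rw [List.cons_append, PySem.List.insertBy, if_neg (by simp [h a (by simp)]), ih B (fun a ha => h a (by simp [ha]))]
    simp

-- stable sort by the 0/1 key is the stable partition: alnum chars first, specials after
lemma pvSortedPartition (cs : List Char) :
    PySem.List.sorted cs (fun c => if PySem.Chars.isalnum c then (0 : Int) else 1) false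
    = cs.filter (fun c => PySem.Chars.isalnum c) ++ cs.filter (fun c => !PySem.Chars.isalnum c) := by
  rw [PySem.List.sorted_eq_foldl_insertBy]
  suffices h : ∀ (cs A B : List Char), (∀ a ∈ A, PySem.Chars.isalnum a = true) →
      (∀ b ∈ B, PySem.Chars.isalnum b = false) →
      cs.foldl (fun acc x => PySem.List.insertBy
        (fun a b => decide ((if PySem.Chars.isalnum a then (0 : Int) else 1) < (if PySem.Chars.isalnum b then (0 : Int) else 1))) x acc)
        (A ++ B)
      = (A ++ cs.filter (fun c => PySem.Chars.isalnum c)) ++ (B ++ cs.filter (fun c => !PySem.Chars.isalnum c)) by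
    simpa using h cs [] [] (by simp) (by simp)
  intro cs
  induction cs with
  | nil => intro A B _ _; simp
  | cons c cs ih =>
    intro A B hA hB
    by_cases hc : PySem.Chars.isalnum c
    · have hins : PySem.List.insertBy
          (fun a b => decide ((if PySem.Chars.isalnum a then (0 : Int) else 1) < (if PySem.Chars.isalnum b then (0 : Int) else 1))) c (A ++ B)
          = (A ++ [c]) ++ B := by
        rw [pvInsertBy_append _ _ A B (fun a ha => by simp [hc, hA a ha])]
        cases B with
        | nil => simp [PySem.List.insertBy]
        | cons b B' =>
          rw [PySem.List.insertBy, if_pos (by simp [hc, hB b (by simp)])]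
          simp
      simp only [List.foldl_cons, hins]
      have hA' : ∀ a ∈ A ++ [c], PySem.Chars.isalnum a = true := by
        intro a ha
        rcases List.mem_append.mp ha with h | h
        · exact hA a h
        · simp only [List.mem_singleton] at h; subst h; exact hc
      rw [ih (A ++ [c]) B hA' hB]
      simp [hc]
    · have hins : PySem.List.insertBy
          (fun a b => decide ((if PySem.Chars.isalnum a then (0 : Int) else 1) < (if PySem.Chars.isalnum b then (0 : Int) else 1))) c (A ++ B)
          = A ++ (B ++ [c]) := by
        rw [PySem.List.insertBy_of_forall_not_before _ _ _ (by intro y _; simp [hc]; split <;> simp), List.append_assoc]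
      simp only [List.foldl_cons, hins]
      have hB' : ∀ b ∈ B ++ [c], PySem.Chars.isalnum b = false := by
        intro b hb
        rcases List.mem_append.mp hb with h | h
        · exact hB b h
        · simp only [List.mem_singleton] at h; subst h; simpa using hc
      rw [ih A (B ++ [c]) hA hB']
      simp [hc]

-- A's outer concatenation loop is " ".join plus a trailing space (on a nonempty word list)
lemma pvJoin (g : List Char → List Char) : ∀ (rs : List (List Char)) (acc : List Char), rs ≠ [] →
    rs.foldl (fun final item => final ++ g item ++ [' ']) acc
    = acc ++ PySem.Chars.join [' '] (rs.map g) ++ [' '] := by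
  intro rs
  induction rs with
  | nil => intro acc h; exact absurd rfl h
  | cons r rs ih =>
    intro acc _
    cases rs with
    | nil => simp [PySem.Chars.join_singleton]
    | cons r' rs' =>
      rw [List.foldl_cons, ih _ (by simp)]
      simp only [List.map_cons]
      rw [PySem.Chars.join_cons_cons]
      simp [List.append_assoc]

-- ===== VERDICT (by name: the statement is the Claim_ definition above) =====
theorem first_digit_to_end_spec : Claim_equal_first_digit_to_end := by
  intro my_input _
  simp only [Spec_first_digit_to_end, first_digit_to_end, first_digit_to_end_alt]
  have hfa : (fun (final : List Char) (item : List Char) =>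
        let sa := item.foldl (fun (sa : List Char × List Char) char =>
          if PySem.Chars.isalnum char then (sa.1, sa.2 ++ [char]) else (sa.1 ++ [char], sa.2)) ([], [])
        final ++ sa.2 ++ sa.1 ++ [' '])
      = (fun (final : List Char) (item : List Char) =>
        final ++ PySem.List.sorted item (fun c => if PySem.Chars.isalnum c then (0 : Int) else 1) false ++ [' ']) := by
    funext final item
    simp only [pvBucket item [] [], List.nil_append, pvSortedPartition, List.append_assoc]
  rw [hfa, pvJoin _ _ _ (by simp [pvSplitOn_ne_nil]), List.nil_append]
  rfl
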